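-- pv_equiv track=rewrite | github.com/lucasgferreira32621/logicaprogramacao | prova2.py | exerc4
-- ===== SOURCE A (Python) =====
-- def exerc4(lista):
--   medias_inferiores_que_7 = 0
--   for elemento in lista:
--     if elemento < 7:
--       medias_inferiores_que_7 += 1
--   if medias_inferiores_que_7 * len(lista) > 0.25:
--     return "Professor Coxa"
--   else:
--     return "Professor Padrão"
-- ===== SOURCE B (Python) =====
-- def exerc4(lista):
--   if any(elemento < 7 for elemento in lista):
--     return "Professor Coxa"
--   return "Professor Padrão"
-- ===== Notes on version B (the rewrite author's own statement) =====
-- stated objective: simpler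
-- what changed: Replaces the count-then-float-compare (count*len > 0.25) with a short-circuiting existence test any(e < 7), exploiting that an integer product exceeds 0.25 iff at least one element is below 7.
import Mathlib
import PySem

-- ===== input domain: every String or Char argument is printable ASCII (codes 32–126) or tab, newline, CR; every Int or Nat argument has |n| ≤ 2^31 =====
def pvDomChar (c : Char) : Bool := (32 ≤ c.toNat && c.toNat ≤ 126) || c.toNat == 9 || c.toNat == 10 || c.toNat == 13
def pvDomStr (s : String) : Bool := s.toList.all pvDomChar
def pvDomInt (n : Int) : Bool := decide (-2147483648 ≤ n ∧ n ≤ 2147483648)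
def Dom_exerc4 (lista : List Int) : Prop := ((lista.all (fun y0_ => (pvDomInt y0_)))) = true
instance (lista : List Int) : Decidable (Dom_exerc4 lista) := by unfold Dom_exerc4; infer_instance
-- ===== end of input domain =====

-- B replaces A's count-then-arithmetic-compare with a short-circuiting existence test (simpler; same result).


-- ===== PORT A =====
def exerc4 (lista : List Int) : String :=
  let medias : Int := lista.foldl (fun acc elemento => if elemento < 7 then acc + 1 else acc) 0
  -- Python compares the integer 'medias * len(lista)' with the float 0.25; for an
  -- integer n, n > 0.25 holds exactly when n ≥ 1 — this is an exact port of that test.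
  if medias * (lista.length : Int) ≥ 1 then "Professor Coxa" else "Professor Padrão"

-- ===== PORT B =====
def exerc4_alt (lista : List Int) : String :=
  if lista.any (fun elemento => elemento < 7) then "Professor Coxa" else "Professor Padrão"

-- ===== PRECONDITION & SPEC =====
def Spec_exerc4 (lista : List Int) (out : String) : Prop := out = exerc4_alt lista
instance (lista : List Int) (out : String) : Decidable (Spec_exerc4 lista out) := by unfold Spec_exerc4; infer_instance

-- ===== CLAIM (what is proved, stated in full; the proofs are below) =====
def Claim_equal_exerc4 : Prop := ∀ (lista : List Int), Dom_exerc4 lista → Spec_exerc4 lista (exerc4 lista)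

-- ===== LEMMAS AND PROOFS =====

-- A's fold counts the elements below 7 (shifted by the accumulator).
theorem exerc4_fold_count (lista : List Int) (a : Int) :
    lista.foldl (fun acc elemento => if elemento < 7 then acc + 1 else acc) a
      = a + (lista.countP (fun e => decide (e < 7)) : Int) := by
  induction lista generalizing a with
  | nil => simp
  | cons x xs ih =>
    simp only [List.foldl_cons, List.countP_cons, ih]
    by_cases h : x < 7 <;> simp [h] <;> ring

-- ===== VERDICT (by name: the statement is the Claim_ definition above) =====
theorem exerc4_spec : Claim_equal_exerc4 := by
  intro lista _
  unfold Spec_exerc4 exerc4 exerc4_alt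
  simp only [exerc4_fold_count, zero_add]
  rcases h : lista.any (fun elemento => decide (elemento < 7)) with hF | hT
  · -- no element below 7: count = 0
    have hc : lista.countP (fun e => decide (e < 7)) = 0 := by
      rw [List.countP_eq_zero]
      intro a ha
      have := (List.any_eq_false.mp h) a ha
      simpa using this
    simp [hc]
  · -- some element below 7: count ≥ 1 and length ≥ 1
    obtain ⟨a, ha, hlt⟩ := List.any_eq_true.mp h
    have hc : 1 ≤ lista.countP (fun e => decide (e < 7)) := by
      rcases Nat.eq_zero_or_pos (lista.countP (fun e => decide (e < 7))) with h0 | h1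
      · exact absurd (by simpa using (List.countP_eq_zero.mp h0) a ha) (by simpa using hlt)
      · exact h1
    have hl : 1 ≤ lista.length := List.length_pos_of_mem ha
    have : (1 : Int) ≤ (lista.countP (fun e => decide (e < 7)) : Int) * lista.length := by
      have := mul_le_mul (Int.ofNat_le.mpr hc) (Int.ofNat_le.mpr hl) (by norm_num) (by positivity)
      simpa using this
    simp [this]
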